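-- pv_equiv track=rewrite | github.com/notashwinii/CRISPRnase | backend/src/core/guide_designer.py | _convert_pam_to_regex
-- ===== SOURCE A (Python) =====
-- def _convert_pam_to_regex(pam: str) -> str:
--     """Convert IUPAC nucleotide codes to regex pattern"""
--     conversions = {
--         'N': '[ATCG]',
--         'R': '[AG]',
--         'Y': '[CT]',
--         'S': '[GC]',
--         'W': '[AT]',
--         'K': '[GT]',
--         'M': '[AC]',
--         'B': '[CGT]',
--         'D': '[AGT]',
--         'H': '[ACT]',
--         'V': '[ACG]'
--     }
--     pattern = pam
--     for code, regex in conversions.items():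
--         pattern = pattern.replace(code, regex)
--     return pattern
-- ===== SOURCE B (Python) =====
-- def _convert_pam_to_regex(pam: str) -> str:
--     """Convert IUPAC nucleotide codes to regex pattern (single pass, no dict)"""
--     parts = []
--     for c in pam:
--         if c == 'N':
--             parts.append('[ATCG]')
--         elif c == 'R':
--             parts.append('[AG]')
--         elif c == 'Y':
--             parts.append('[CT]')
--         elif c == 'S':
--             parts.append('[GC]')
--         elif c == 'W':
--             parts.append('[AT]')
--         elif c == 'K':
--             parts.append('[GT]')
--         elif c == 'M':
--             parts.append('[AC]')
--         elif c == 'B':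
--             parts.append('[CGT]')
--         elif c == 'D':
--             parts.append('[AGT]')
--         elif c == 'H':
--             parts.append('[ACT]')
--         elif c == 'V':
--             parts.append('[ACG]')
--         else:
--             parts.append(c)
--     return ''.join(parts)
-- ===== Notes on version B (the rewrite author's own statement) =====
-- stated objective: alternative
-- what changed: B makes one pass over pam, expanding each character through an if/elif chain into a parts list joined once at the end (no dict, no string rescans), instead of A's eleven whole-string .replace passes over a conversions dict; equivalent because no replacement value contains an IUPAC key.
import Mathlib
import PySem

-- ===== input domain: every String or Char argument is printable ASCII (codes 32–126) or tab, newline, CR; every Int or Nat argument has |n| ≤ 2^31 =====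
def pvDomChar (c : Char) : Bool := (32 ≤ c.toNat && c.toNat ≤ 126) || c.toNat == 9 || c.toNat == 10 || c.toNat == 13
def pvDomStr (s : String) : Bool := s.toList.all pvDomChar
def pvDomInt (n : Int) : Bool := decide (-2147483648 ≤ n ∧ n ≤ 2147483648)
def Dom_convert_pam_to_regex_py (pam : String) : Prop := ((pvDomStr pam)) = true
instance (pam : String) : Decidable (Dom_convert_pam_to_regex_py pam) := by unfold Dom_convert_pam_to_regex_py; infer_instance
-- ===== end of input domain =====

-- B makes one pass over pam, expanding each character through an if/elif chain into a parts
-- list joined once at the end (no dict, no whole-string rescans), instead of A's eleven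
-- .replace passes; the two agree because no replacement value contains an IUPAC key.

-- ===== PORT A =====
-- A: build the dict, then fold over its items doing pattern = pattern.replace(code, regex)
def convert_pam_to_regex_py (pam : String) : String :=
  let conversions : PySem.Dict String String := PySem.Dict.ofList
    [("N","[ATCG]"),("R","[AG]"),("Y","[CT]"),("S","[GC]"),("W","[AT]"),
     ("K","[GT]"),("M","[AC]"),("B","[CGT]"),("D","[AGT]"),("H","[ACT]"),("V","[ACG]")]
  conversions.items.foldl (fun pattern p => PySem.Str.replace pattern p.1 p.2) pam

-- ===== PORT B =====
-- B's if/elif chain: the expansion of one character (the else-branch keeps the character)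
def pvExpand (c : Char) : List Char :=
  if c = 'N' then "[ATCG]".toList else if c = 'R' then "[AG]".toList
  else if c = 'Y' then "[CT]".toList else if c = 'S' then "[GC]".toList
  else if c = 'W' then "[AT]".toList else if c = 'K' then "[GT]".toList
  else if c = 'M' then "[AC]".toList else if c = 'B' then "[CGT]".toList
  else if c = 'D' then "[AGT]".toList else if c = 'H' then "[ACT]".toList
  else if c = 'V' then "[ACG]".toList else [c]

-- B's loop: parts.append(<expansion of c>) for each c, then ''.join(parts)
def convert_pam_to_regex_py_alt (pam : String) : String :=
  let parts : List (List Char) := pam.toList.foldl (fun acc c => acc ++ [pvExpand c]) []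
  String.ofList parts.flatten

-- ===== PRECONDITION & SPEC =====
def Spec_convert_pam_to_regex_py (pam : String) (out : String) : Prop := out = convert_pam_to_regex_py_alt pam
instance (pam : String) (out : String) : Decidable (Spec_convert_pam_to_regex_py pam out) := by unfold Spec_convert_pam_to_regex_py; infer_instance

-- ===== CLAIM (what is proved, stated in full; the proofs are below) =====
def Claim_equal_convert_pam_to_regex_py : Prop := ∀ (pam : String), Dom_convert_pam_to_regex_py pam → Spec_convert_pam_to_regex_py pam (convert_pam_to_regex_py pam)

-- ===== LEMMAS AND PROOFS =====

-- one single-character replacement as a per-character map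
def step (k : Char) (r : List Char) (c : Char) : List Char := if c = k then r else [c]

theorem go_single (k : Char) (r : List Char) :
    ∀ (l acc : List Char), PySem.Chars.replace.go [k] r l.length l acc =
      acc.reverse ++ l.flatMap (step k r) := by
  intro l
  induction l with
  | nil => intro acc; simp [PySem.Chars.replace.go]
  | cons c t ih =>
    intro acc
    rw [List.length_cons, PySem.Chars.replace.go]
    by_cases h : c = k
    · subst h
      simp [List.isPrefixOf, ih, step]
    · have hp : [k].isPrefixOf (c :: t) = false := by
        simp [List.isPrefixOf, Ne.symm h]
      simp [hp, h, ih, step]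

-- s.replace(k, r) for a one-character k is the per-character map `step k r`
theorem replace_single (k : Char) (r l : List Char) :
    PySem.Chars.replace l [k] r = l.flatMap (step k r) := by
  rw [PySem.Chars.replace]
  simp [go_single]

-- the 11 composed per-character steps collapse to `pvExpand` on every character
theorem comp_eq_expand (c : Char) :
    List.flatMap
      (fun x => List.flatMap
        (fun x => List.flatMap
          (fun x => List.flatMap
            (fun x => List.flatMap
              (fun x => List.flatMap
                (fun x => List.flatMap
                  (fun x => List.flatMap
                    (fun x => List.flatMap
                      (fun x => List.flatMap (step 'V' "[ACG]".toList) (step 'H' "[ACT]".toList x))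
                      (step 'D' "[AGT]".toList x))
                    (step 'B' "[CGT]".toList x))
                  (step 'M' "[AC]".toList x))
                (step 'K' "[GT]".toList x))
              (step 'W' "[AT]".toList x))
            (step 'S' "[GC]".toList x))
          (step 'Y' "[CT]".toList x))
        (step 'R' "[AG]".toList x))
      (step 'N' "[ATCG]".toList c)
    = pvExpand c := by
  by_cases hN : c = 'N'; · subst hN; decide
  by_cases hR : c = 'R'; · subst hR; decide
  by_cases hY : c = 'Y'; · subst hY; decide
  by_cases hS : c = 'S'; · subst hS; decide
  by_cases hW : c = 'W'; · subst hW; decide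
  by_cases hK : c = 'K'; · subst hK; decide
  by_cases hM : c = 'M'; · subst hM; decide
  by_cases hB : c = 'B'; · subst hB; decide
  by_cases hD : c = 'D'; · subst hD; decide
  by_cases hH : c = 'H'; · subst hH; decide
  by_cases hV : c = 'V'; · subst hV; decide
  simp [step, pvExpand, hN, hR, hY, hS, hW, hK, hM, hB, hD, hH, hV]

-- A's output, character-wise
theorem A_flatMap (pam : String) :
    (convert_pam_to_regex_py pam).toList = pam.toList.flatMap pvExpand := by
  simp only [convert_pam_to_regex_py]
  rw [show (PySem.Dict.ofList
      [("N","[ATCG]"),("R","[AG]"),("Y","[CT]"),("S","[GC]"),("W","[AT]"),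
       ("K","[GT]"),("M","[AC]"),("B","[CGT]"),("D","[AGT]"),("H","[ACT]"),("V","[ACG]")]
      : PySem.Dict String String).items =
      [("N","[ATCG]"),("R","[AG]"),("Y","[CT]"),("S","[GC]"),("W","[AT]"),
       ("K","[GT]"),("M","[AC]"),("B","[CGT]"),("D","[AGT]"),("H","[ACT]"),("V","[ACG]")]
    from by decide]
  simp only [List.foldl]
  simp only [PySem.Str.toList_replace,
    show ("N" : String).toList = ['N'] from by decide, show ("R" : String).toList = ['R'] from by decide,
    show ("Y" : String).toList = ['Y'] from by decide, show ("S" : String).toList = ['S'] from by decide,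
    show ("W" : String).toList = ['W'] from by decide, show ("K" : String).toList = ['K'] from by decide,
    show ("M" : String).toList = ['M'] from by decide, show ("B" : String).toList = ['B'] from by decide,
    show ("D" : String).toList = ['D'] from by decide, show ("H" : String).toList = ['H'] from by decide,
    show ("V" : String).toList = ['V'] from by decide,
    replace_single, List.flatMap_assoc]
  refine List.flatMap_congr ?_
  intro c _
  exact comp_eq_expand c

-- B's loop, character-wise
theorem foldl_parts (l : List Char) : ∀ acc : List (List Char),
    (l.foldl (fun acc c => acc ++ [pvExpand c]) acc).flatten = acc.flatten ++ l.flatMap pvExpand := by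
  induction l with
  | nil => intro acc; simp
  | cons c t ih =>
    intro acc
    rw [List.foldl_cons, ih]
    simp

-- ===== VERDICT (by name: the statement is the Claim_ definition above) =====
theorem convert_pam_to_regex_py_spec : Claim_equal_convert_pam_to_regex_py := by
  intro pam _
  unfold Spec_convert_pam_to_regex_py
  apply String.toList_inj.mp
  rw [A_flatMap]
  simp only [convert_pam_to_regex_py_alt]
  rw [foldl_parts]
  simp
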